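-- pv_equiv track=rewrite | github.com/marcus-deans/duke-computationalmethods | Apt3/Pikachu.py | check
-- ===== SOURCE A (Python) =====
-- def check(word):
--     valid = True
--     cha = []
--     p = 'p'
--     i = 'i'
--     k = 'k'
--     a = 'a'
--     c = 'c'
--     h = 'h'
--     u = 'u'
--     for x in range(0,len(word)):
--         cha.append(word[x])
--     y=0
--     while y < len(word):
--         try:
--             if (((cha[y]==p)and(cha[y+1]==i))or((cha[y]==k)and((cha[y+1]==a)))):
--                 y += 1
--             elif ((cha[y]==c)and(cha[y+1]==h)and(cha[y+2]==u)):
--                 y += 2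
--             else:
--                 valid = False
--         except:
--             valid=False
--         y+=1
--     if (valid==True):
--         return "YES"
--     if (valid==False):
--         return "NO"
-- ===== SOURCE B (Python) =====
-- def check(word):
--     n = len(word)
--     reach = [True] + [False] * n
--     for i in range(1, n + 1):
--         two = i >= 2 and reach[i - 2] and word[i - 2:i] in ("pi", "ka")
--         three = i >= 3 and reach[i - 3] and word[i - 3:i] == "chu"
--         reach[i] = two or three
--     return "YES" if reach[n] else "NO"
-- ===== Notes on version B (the rewrite author's own statement) =====
-- stated objective: alternative
-- what changed: Replaces A's index-advancing greedy while-loop with try/except guards by a boolean dynamic-programming table reachable[0..n] over prefix lengths, checking each token ending at every position.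
import Mathlib
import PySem

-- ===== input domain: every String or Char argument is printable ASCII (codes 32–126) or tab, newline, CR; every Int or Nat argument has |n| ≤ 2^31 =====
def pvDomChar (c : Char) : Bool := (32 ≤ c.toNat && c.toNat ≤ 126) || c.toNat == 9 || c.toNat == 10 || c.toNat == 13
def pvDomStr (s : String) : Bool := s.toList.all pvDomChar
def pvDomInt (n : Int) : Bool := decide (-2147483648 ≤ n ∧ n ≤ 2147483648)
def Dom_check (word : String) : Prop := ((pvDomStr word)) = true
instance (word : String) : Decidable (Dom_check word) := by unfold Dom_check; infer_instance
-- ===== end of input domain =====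

-- B replaces A's index-advancing greedy while-loop (with try/except for overruns) by a
-- left-to-right boolean DP over prefix lengths; alternative decomposition, no speed claim.

-- ===== PORT A =====
-- A's while-loop: at index y it tries "pi"/"ka" (advance 2), then "chu" (advance 3),
-- else marks invalid and advances 1; any IndexError inside the try also marks invalid
-- and advances 1.  Index accesses mirror Python's short-circuit evaluation order:
-- a `none` lookup is exactly where Python's cha[...] raises and the except fires.
def checkLoop (cha : List Char) (n y : Nat) (valid : Bool) : Bool :=
  if _h : y < n then
    match cha[y]? with
    | none => checkLoop cha n (y + 1) false            -- cha[y] raises → except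
    | some cy =>
      if cy = 'p' then
        match cha[y + 1]? with
        | none => checkLoop cha n (y + 1) false        -- cha[y+1] raises → except
        | some c1 =>
          if c1 = 'i' then checkLoop cha n (y + 2) valid
          else checkLoop cha n (y + 1) false           -- no branch matches → valid=False
      else if cy = 'k' then
        match cha[y + 1]? with
        | none => checkLoop cha n (y + 1) false
        | some c1 =>
          if c1 = 'a' then checkLoop cha n (y + 2) valid
          else checkLoop cha n (y + 1) false
      else if cy = 'c' then
        match cha[y + 1]? with
        | none => checkLoop cha n (y + 1) false
        | some c1 =>
          if c1 = 'h' then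
            match cha[y + 2]? with
            | none => checkLoop cha n (y + 1) false
            | some c2 =>
              if c2 = 'u' then checkLoop cha n (y + 3) valid
              else checkLoop cha n (y + 1) false
          else checkLoop cha n (y + 1) false
      else checkLoop cha n (y + 1) false
  else valid
termination_by n - y

def check (word : String) : String :=
  -- the for-loop copies word's characters one by one into the list cha
  let cha : List Char := word.toList
  if checkLoop cha cha.length 0 true then "YES" else "NO"

-- ===== PORT B =====
-- one DP step for prefix length i (Source B's loop body; word[i-2:i] is drop/take since i-2 ≥ 0
-- is guarded; reach[i] = ... assignment into the preallocated array is the append here,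
-- as only already-written cells are read)
def altStep (cs : List Char) (reach : List Bool) (i : Nat) : List Bool :=
  let two := decide (2 ≤ i) && reach.getD (i - 2) false &&
      ((cs.drop (i - 2)).take 2 == ['p', 'i'] || (cs.drop (i - 2)).take 2 == ['k', 'a'])
  let three := decide (3 ≤ i) && reach.getD (i - 3) false &&
      ((cs.drop (i - 3)).take 3 == ['c', 'h', 'u'])
  reach ++ [two || three]

def check_alt (word : String) : String :=
  let cs : List Char := word.toList
  let n := cs.length
  -- range(1, n+1) over nonnegative i
  let reach := (List.range' 1 n).foldl (altStep cs) [true]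
  if reach.getD n false then "YES" else "NO"

-- ===== PRECONDITION & SPEC =====
def Spec_check (word : String) (out : String) : Prop := out = check_alt word
instance (word : String) (out : String) : Decidable (Spec_check word out) := by unfold Spec_check; infer_instance

-- ===== CLAIM (what is proved, stated in full; the proofs are below) =====
def Claim_equal_check : Prop := ∀ (word : String), Dom_check word → Spec_check word (check word)

-- ===== LEMMAS AND PROOFS =====

/-- The common specification: the word is a concatenation of "pi"/"ka"/"chu" tokens. -/
inductive Toks : List Char → Prop
  | nil : Toks []
  | pi {l : List Char} : Toks l → Toks ('p' :: 'i' :: l)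
  | ka {l : List Char} : Toks l → Toks ('k' :: 'a' :: l)
  | chu {l : List Char} : Toks l → Toks ('c' :: 'h' :: 'u' :: l)

theorem toks_inv {c : Char} {l : List Char} (h : Toks (c :: l)) :
    (c = 'p' ∧ ∃ r, l = 'i' :: r ∧ Toks r) ∨
    (c = 'k' ∧ ∃ r, l = 'a' :: r ∧ Toks r) ∨
    (c = 'c' ∧ ∃ r, l = 'h' :: 'u' :: r ∧ Toks r) := by
  cases h with
  | pi h => exact Or.inl ⟨rfl, _, rfl, h⟩
  | ka h => exact Or.inr (Or.inl ⟨rfl, _, rfl, h⟩)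
  | chu h => exact Or.inr (Or.inr ⟨rfl, _, rfl, h⟩)

theorem toks_pi {l : List Char} : Toks ('p' :: 'i' :: l) ↔ Toks l := by
  refine ⟨fun h => ?_, Toks.pi⟩
  rcases toks_inv h with ⟨_, r, hr, htr⟩ | ⟨h1, _⟩ | ⟨h1, _⟩ <;> simp_all

theorem toks_ka {l : List Char} : Toks ('k' :: 'a' :: l) ↔ Toks l := by
  refine ⟨fun h => ?_, Toks.ka⟩
  rcases toks_inv h with ⟨h1, _⟩ | ⟨_, r, hr, htr⟩ | ⟨h1, _⟩ <;> simp_all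

theorem toks_chu {l : List Char} : Toks ('c' :: 'h' :: 'u' :: l) ↔ Toks l := by
  refine ⟨fun h => ?_, Toks.chu⟩
  rcases toks_inv h with ⟨h1, _⟩ | ⟨h1, _⟩ | ⟨_, r, hr, htr⟩ <;> simp_all

theorem Toks_append {a b : List Char} (ha : Toks a) (hb : Toks b) : Toks (a ++ b) := by
  induction ha with
  | nil => simpa using hb
  | pi _ ih => exact Toks.pi ih
  | ka _ ih => exact Toks.ka ih
  | chu _ ih => exact Toks.chu ih

theorem Toks_right {l : List Char} (h : Toks l) :
    l = [] ∨ ∃ l', Toks l' ∧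
      (l = l' ++ ['p', 'i'] ∨ l = l' ++ ['k', 'a'] ∨ l = l' ++ ['c', 'h', 'u']) := by
  induction h with
  | nil => exact Or.inl rfl
  | @pi m hm ih =>
    right
    rcases ih with rfl | ⟨l', hl', hcase⟩
    · exact ⟨[], Toks.nil, Or.inl rfl⟩
    · refine ⟨'p' :: 'i' :: l', Toks.pi hl', ?_⟩
      rcases hcase with rfl | rfl | rfl
      · exact Or.inl rfl
      · exact Or.inr (Or.inl rfl)
      · exact Or.inr (Or.inr rfl)
  | @ka m hm ih =>
    right
    rcases ih with rfl | ⟨l', hl', hcase⟩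
    · exact ⟨[], Toks.nil, Or.inr (Or.inl rfl)⟩
    · refine ⟨'k' :: 'a' :: l', Toks.ka hl', ?_⟩
      rcases hcase with rfl | rfl | rfl
      · exact Or.inl rfl
      · exact Or.inr (Or.inl rfl)
      · exact Or.inr (Or.inr rfl)
  | @chu m hm ih =>
    right
    rcases ih with rfl | ⟨l', hl', hcase⟩
    · exact ⟨[], Toks.nil, Or.inr (Or.inr rfl)⟩
    · refine ⟨'c' :: 'h' :: 'u' :: l', Toks.chu hl', ?_⟩
      rcases hcase with rfl | rfl | rfl
      · exact Or.inl rfl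
      · exact Or.inr (Or.inl rfl)
      · exact Or.inr (Or.inr rfl)

theorem checkLoop_false (cha : List Char) (n y : Nat) :
    checkLoop cha n y false = false := by
  have main : ∀ k y, n - y ≤ k → checkLoop cha n y false = false := by
    intro k
    induction k with
    | zero =>
      intro y hy
      rw [checkLoop]
      have hn : ¬ y < n := by omega
      simp [hn]
    | succ k ih =>
      intro y hy
      rw [checkLoop]
      by_cases h : y < n
      · have e1 := ih (y + 1) (by omega)
        have e2 := ih (y + 2) (by omega)
        have e3 := ih (y + 3) (by omega)
        simp only [h, dif_pos]
        repeat' split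
        all_goals first | exact e1 | exact e2 | exact e3
      · simp [h]
  exact main (n - y) y le_rfl

theorem checkLoop_true (cha : List Char) (y : Nat) :
    checkLoop cha cha.length y true = true ↔ Toks (cha.drop y) := by
  have main : ∀ k y, cha.length - y ≤ k →
      (checkLoop cha cha.length y true = true ↔ Toks (cha.drop y)) := by
    intro k
    induction k with
    | zero =>
      intro y hy
      have hn : ¬ y < cha.length := by omega
      have hdrop : cha.drop y = [] := List.drop_eq_nil_of_le (by omega)
      rw [checkLoop, hdrop, dif_neg hn]
      exact iff_of_true rfl Toks.nil
    | succ k ih =>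
      intro y hy
      by_cases h : y < cha.length
      · rw [checkLoop, dif_pos h]
        cases hdt : cha.drop y with
        | nil =>
          exfalso
          have := List.drop_eq_nil_iff.mp hdt
          omega
        | cons c rest =>
          have g0 : cha[y]? = some c := by
            have h0 : (cha.drop y)[0]? = some c := by rw [hdt]; rfl
            rw [List.getElem?_drop] at h0
            simpa using h0
          have g1 : cha[y + 1]? = rest[0]? := by
            have h0 : (cha.drop y)[1]? = rest[0]? := by rw [hdt]; rfl
            rw [List.getElem?_drop] at h0
            simpa using h0
          have g2 : cha[y + 2]? = rest[1]? := by
            have h0 : (cha.drop y)[2]? = rest[1]? := by rw [hdt]; rfl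
            rw [List.getElem?_drop] at h0
            simpa using h0
          have d2 : cha.drop (y + 2) = rest.drop 1 := by
            have h0 := congrArg (List.drop 2) hdt
            rw [List.drop_drop] at h0
            simpa [Nat.add_comm] using h0
          have d3 : cha.drop (y + 3) = rest.drop 2 := by
            have h0 := congrArg (List.drop 3) hdt
            rw [List.drop_drop] at h0
            simpa [Nat.add_comm] using h0
          rw [g0]
          try simp only [List.getElem?_nil, List.getElem?_cons_zero, List.getElem?_cons_succ]
          try dsimp only
          by_cases hcp : c = 'p'
          · subst hcp
            simp only [↓reduceIte]
            rw [g1]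
            cases rest with
            | nil =>
              try simp only [List.getElem?_nil, List.getElem?_cons_zero, List.getElem?_cons_succ]
              try dsimp only
              rw [checkLoop_false]
              refine iff_of_false (by simp) ?_
              intro hT
              rcases toks_inv hT with ⟨_, r, hr, _⟩ | ⟨h1, _⟩ | ⟨h1, _⟩ <;> simp_all
            | cons c1 rest' =>
              try simp only [List.getElem?_nil, List.getElem?_cons_zero, List.getElem?_cons_succ]
              try dsimp only
              by_cases hc1 : c1 = 'i'
              · subst hc1
                simp only [↓reduceIte]
                have IH := ih (y + 2) (by omega)
                rw [d2] at IH
                simp only [List.drop_one, List.tail_cons] at IH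
                rw [IH, toks_pi]
              · rw [if_neg hc1, checkLoop_false]
                refine iff_of_false (by simp) ?_
                intro hT
                rcases toks_inv hT with ⟨_, r, hr, _⟩ | ⟨h1, _⟩ | ⟨h1, _⟩ <;> simp_all
          · rw [if_neg hcp]
            by_cases hck : c = 'k'
            · subst hck
              simp only [↓reduceIte]
              rw [g1]
              cases rest with
              | nil =>
                try simp only [List.getElem?_nil, List.getElem?_cons_zero, List.getElem?_cons_succ]
                try dsimp only
                rw [checkLoop_false]
                refine iff_of_false (by simp) ?_
                intro hT
                rcases toks_inv hT with ⟨h1, _⟩ | ⟨_, r, hr, _⟩ | ⟨h1, _⟩ <;> simp_all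
              | cons c1 rest' =>
                try simp only [List.getElem?_nil, List.getElem?_cons_zero, List.getElem?_cons_succ]
                try dsimp only
                by_cases hc1 : c1 = 'a'
                · subst hc1
                  simp only [↓reduceIte]
                  have IH := ih (y + 2) (by omega)
                  rw [d2] at IH
                  simp only [List.drop_one, List.tail_cons] at IH
                  rw [IH, toks_ka]
                · rw [if_neg hc1, checkLoop_false]
                  refine iff_of_false (by simp) ?_
                  intro hT
                  rcases toks_inv hT with ⟨h1, _⟩ | ⟨_, r, hr, _⟩ | ⟨h1, _⟩ <;> simp_all
            · rw [if_neg hck]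
              by_cases hcc : c = 'c'
              · subst hcc
                simp only [↓reduceIte]
                rw [g1]
                cases rest with
                | nil =>
                  try simp only [List.getElem?_nil, List.getElem?_cons_zero, List.getElem?_cons_succ]
                  try dsimp only
                  rw [checkLoop_false]
                  refine iff_of_false (by simp) ?_
                  intro hT
                  rcases toks_inv hT with ⟨h1, _⟩ | ⟨h1, _⟩ | ⟨_, r, hr, _⟩ <;> simp_all
                | cons c1 rest' =>
                  try simp only [List.getElem?_nil, List.getElem?_cons_zero, List.getElem?_cons_succ]
                  try dsimp only
                  by_cases hc1 : c1 = 'h'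
                  · subst hc1
                    simp only [↓reduceIte]
                    rw [g2]
                    cases rest' with
                    | nil =>
                      try simp only [List.getElem?_nil, List.getElem?_cons_zero, List.getElem?_cons_succ]
                      try dsimp only
                      rw [checkLoop_false]
                      refine iff_of_false (by simp) ?_
                      intro hT
                      rcases toks_inv hT with ⟨h1, _⟩ | ⟨h1, _⟩ | ⟨_, r, hr, _⟩ <;> simp_all
                    | cons c2 rest'' =>
                      try simp only [List.getElem?_nil, List.getElem?_cons_zero, List.getElem?_cons_succ]
                      try dsimp only
                      by_cases hc2 : c2 = 'u'
                      · subst hc2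
                        simp only [↓reduceIte]
                        have IH := ih (y + 3) (by omega)
                        rw [d3] at IH
                        simp only [List.drop_succ_cons, List.drop_one, List.drop_zero, List.tail_cons] at IH
                        rw [IH, toks_chu]
                      · rw [if_neg hc2, checkLoop_false]
                        refine iff_of_false (by simp) ?_
                        intro hT
                        rcases toks_inv hT with ⟨h1, _⟩ | ⟨h1, _⟩ | ⟨_, r, hr, _⟩ <;> simp_all
                  · rw [if_neg hc1, checkLoop_false]
                    refine iff_of_false (by simp) ?_
                    intro hT
                    rcases toks_inv hT with ⟨h1, _⟩ | ⟨h1, _⟩ | ⟨_, r, hr, _⟩ <;> simp_all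
              · rw [if_neg hcc, checkLoop_false]
                refine iff_of_false (by simp) ?_
                intro hT
                rcases toks_inv hT with ⟨h1, _⟩ | ⟨h1, _⟩ | ⟨h1, _⟩ <;> simp_all
      · have hdrop : cha.drop y = [] := List.drop_eq_nil_of_le (by omega)
        rw [checkLoop, hdrop, dif_neg h]
        exact iff_of_true rfl Toks.nil
  exact main (cha.length - y) y le_rfl

/-- Peeling one token off the right end of a prefix. -/
theorem toks_take_succ (cs : List Char) (m : Nat) (h : m + 1 ≤ cs.length) :
    Toks (cs.take (m + 1)) ↔
      (1 ≤ m ∧ Toks (cs.take (m - 1)) ∧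
        ((cs.drop (m - 1)).take 2 = ['p', 'i'] ∨ (cs.drop (m - 1)).take 2 = ['k', 'a'])) ∨
      (2 ≤ m ∧ Toks (cs.take (m - 2)) ∧ (cs.drop (m - 2)).take 3 = ['c', 'h', 'u']) := by
  constructor
  · intro hT
    have hlen : (cs.take (m + 1)).length = m + 1 := List.length_take_of_le h
    rcases Toks_right hT with hnil | ⟨l', hl', hcase⟩
    · rw [hnil] at hlen
      simp at hlen
    · rcases hcase with hdec | hdec | hdec
      · left
        have hll : l'.length = m - 1 ∧ 1 ≤ m := by
          have := congrArg List.length hdec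
          simp [hlen] at this
          omega
        have hl'eq : cs.take (m - 1) = l' := by
          have h1 := congrArg (List.take (m - 1)) hdec
          rw [List.take_take, List.take_left' hll.1] at h1
          rw [show min (m - 1) (m + 1) = m - 1 from by omega] at h1
          exact h1
        have hsl : (cs.drop (m - 1)).take 2 = ['p', 'i'] := by
          have h1 := congrArg (List.drop (m - 1)) hdec
          rw [List.drop_take, List.drop_left' hll.1] at h1
          rw [show m + 1 - (m - 1) = 2 from by omega] at h1
          exact h1
        exact ⟨hll.2, hl'eq ▸ hl', Or.inl hsl⟩
      · left
        have hll : l'.length = m - 1 ∧ 1 ≤ m := by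
          have := congrArg List.length hdec
          simp [hlen] at this
          omega
        have hl'eq : cs.take (m - 1) = l' := by
          have h1 := congrArg (List.take (m - 1)) hdec
          rw [List.take_take, List.take_left' hll.1] at h1
          rw [show min (m - 1) (m + 1) = m - 1 from by omega] at h1
          exact h1
        have hsl : (cs.drop (m - 1)).take 2 = ['k', 'a'] := by
          have h1 := congrArg (List.drop (m - 1)) hdec
          rw [List.drop_take, List.drop_left' hll.1] at h1
          rw [show m + 1 - (m - 1) = 2 from by omega] at h1
          exact h1
        exact ⟨hll.2, hl'eq ▸ hl', Or.inr hsl⟩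
      · right
        have hll : l'.length = m - 2 ∧ 2 ≤ m := by
          have := congrArg List.length hdec
          simp [hlen] at this
          omega
        have hl'eq : cs.take (m - 2) = l' := by
          have h1 := congrArg (List.take (m - 2)) hdec
          rw [List.take_take, List.take_left' hll.1] at h1
          rw [show min (m - 2) (m + 1) = m - 2 from by omega] at h1
          exact h1
        have hsl : (cs.drop (m - 2)).take 3 = ['c', 'h', 'u'] := by
          have h1 := congrArg (List.drop (m - 2)) hdec
          rw [List.drop_take, List.drop_left' hll.1] at h1
          rw [show m + 1 - (m - 2) = 3 from by omega] at h1
          exact h1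
        exact ⟨hll.2, hl'eq ▸ hl', hsl⟩
  · intro hC
    rcases hC with ⟨hm, hT, hsl | hsl⟩ | ⟨hm, hT, hsl⟩
    · rw [show m + 1 = (m - 1) + 2 from by omega, List.take_add, hsl]
      exact Toks_append hT (Toks.pi Toks.nil)
    · rw [show m + 1 = (m - 1) + 2 from by omega, List.take_add, hsl]
      exact Toks_append hT (Toks.ka Toks.nil)
    · rw [show m + 1 = (m - 2) + 3 from by omega, List.take_add, hsl]
      exact Toks_append hT (Toks.chu Toks.nil)

theorem altFold_spec (cs : List Char) (m : Nat) (hm : m ≤ cs.length) :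
    ((List.range' 1 m).foldl (altStep cs) [true]).length = m + 1 ∧
    ∀ i ≤ m, (((List.range' 1 m).foldl (altStep cs) [true]).getD i false = true ↔
      Toks (cs.take i)) := by
  induction m with
  | zero =>
    refine ⟨rfl, ?_⟩
    intro i hi
    interval_cases i
    simpa using Toks.nil
  | succ m ih =>
    obtain ⟨hlen, hval⟩ := ih (by omega)
    rw [List.range'_1_concat, List.foldl_append]
    set r := (List.range' 1 m).foldl (altStep cs) [true] with hr
    refine ⟨by simp [altStep, hlen], ?_⟩
    intro i hi
    simp only [List.foldl_cons, List.foldl_nil, altStep]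
    by_cases hile : i ≤ m
    · have hilt : i < r.length := by omega
      rw [List.getD_append _ _ _ _ hilt]
      exact hval i hile
    · have hieq : i = m + 1 := by omega
      subst hieq
      rw [List.getD_append_right _ _ _ _ (by omega), hlen]
      rw [show m + 1 - (m + 1) = 0 from by omega]
      simp only [List.getD_cons_zero]
      rw [toks_take_succ cs m hm]
      simp only [Bool.or_eq_true, Bool.and_eq_true, decide_eq_true_eq, beq_iff_eq]
      rw [show 1 + m - 2 = m - 1 from by omega, show 1 + m - 3 = m - 2 from by omega]
      constructor
      · rintro (⟨⟨h2, hg⟩, hsl⟩ | ⟨⟨h3, hg⟩, hsl⟩)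
        · exact Or.inl ⟨by omega, (hval (m - 1) (by omega)).mp hg, hsl⟩
        · exact Or.inr ⟨by omega, (hval (m - 2) (by omega)).mp hg, hsl⟩
      · rintro (⟨h1, hg, hsl⟩ | ⟨h2, hg, hsl⟩)
        · exact Or.inl ⟨⟨by omega, (hval (m - 1) (by omega)).mpr hg⟩, hsl⟩
        · exact Or.inr ⟨⟨by omega, (hval (m - 2) (by omega)).mpr hg⟩, hsl⟩

-- ===== VERDICT (by name: the statement is the Claim_ definition above) =====
theorem check_spec : Claim_equal_check := by
  intro word _
  unfold Spec_check check check_alt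
  have hA := checkLoop_true word.toList 0
  have hB := (altFold_spec word.toList word.toList.length le_rfl).2
      word.toList.length le_rfl
  simp only [List.drop_zero] at hA
  simp only [List.take_length] at hB
  by_cases h : Toks word.toList
  · rw [if_pos (hA.mpr h), if_pos (hB.mpr h)]
  · rw [if_neg (fun hc => h (hA.mp hc)), if_neg (fun hc => h (hB.mp hc))]
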